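-- pv_equiv track=rewrite | github.com/PyanzinaMaria/Python | 3.py | count_active_devices
-- ===== SOURCE A (Python) =====
-- def count_active_devices(batteryPercentages):
--     count = 0
--     n = len(batteryPercentages)
--
--     for i in range(n):
--         if batteryPercentages[i] > 0:
--             count += 1
--             for j in range(i + 1, n):
--                 batteryPercentages[j] = max(0, batteryPercentages[j] - 1)
--
--     return count
-- ===== SOURCE B (Python) =====
-- def count_active_devices(batteryPercentages):
--     # Single pass: device i is active iff its original battery exceeds the
--     # number of active devices seen so far (clamping at 0 never matters for
--     # the ">0" test). Does not mutate the input (A does).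
--     count = 0
--     for x in batteryPercentages:
--         if x > count:
--             count += 1
--     return count
-- ===== Notes on version B (the rewrite author's own statement) =====
-- stated objective: faster
-- what changed: Replaced the nested loop that decrements every later battery after each active device with a single pass comparing each battery to the running active count (device active iff battery > count so far).
import Mathlib
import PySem

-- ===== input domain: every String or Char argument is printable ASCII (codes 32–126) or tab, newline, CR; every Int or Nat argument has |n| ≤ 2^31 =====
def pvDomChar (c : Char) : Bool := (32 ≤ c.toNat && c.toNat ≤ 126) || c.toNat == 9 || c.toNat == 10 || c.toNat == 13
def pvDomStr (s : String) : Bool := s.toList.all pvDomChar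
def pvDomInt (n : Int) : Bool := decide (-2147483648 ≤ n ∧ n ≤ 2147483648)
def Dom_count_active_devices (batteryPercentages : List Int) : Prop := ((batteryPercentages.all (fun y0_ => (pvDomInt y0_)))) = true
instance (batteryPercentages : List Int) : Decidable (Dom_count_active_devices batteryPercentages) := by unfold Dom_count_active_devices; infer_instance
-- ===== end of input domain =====

-- B replaces A's O(n^2) cascading-decrement nested loop with a single pass
-- (device active iff battery > running count); equivalence is about the return
-- value only — Python A mutates its argument in place, B does not.

-- ===== PORT A =====
-- outer index loop = recursion on the remaining suffix; the inner loop over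
-- range(i+1, n) = the map producing the decremented suffix, same values.
def countActiveLoopA (count : Int) : List Int → Int
  | [] => count
  | x :: rest =>
      if x > 0 then
        countActiveLoopA (count + 1) (rest.map (fun y => max 0 (y - 1)))
      else
        countActiveLoopA count rest
  termination_by l => l.length
  decreasing_by all_goals simp [List.length_map]

def count_active_devices (batteryPercentages : List Int) : Int :=
  countActiveLoopA 0 batteryPercentages

-- ===== PORT B =====
def count_active_devices_alt (batteryPercentages : List Int) : Int :=
  batteryPercentages.foldl (fun count x => if x > count then count + 1 else count) 0

-- ===== PRECONDITION & SPEC =====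
def Spec_count_active_devices (batteryPercentages : List Int) (out : Int) : Prop := out = count_active_devices_alt batteryPercentages
instance (batteryPercentages : List Int) (out : Int) : Decidable (Spec_count_active_devices batteryPercentages out) := by unfold Spec_count_active_devices; infer_instance

-- ===== CLAIM (what is proved, stated in full; the proofs are below) =====
def Claim_equal_count_active_devices : Prop := ∀ (batteryPercentages : List Int), Dom_count_active_devices batteryPercentages → Spec_count_active_devices batteryPercentages (count_active_devices batteryPercentages)

-- ===== LEMMAS AND PROOFS =====

-- After the first increment every pending decrement is of the clamped form
-- max 0 (y - t); this lemma relates A's loop on such a suffix to B's fold.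
theorem countActiveLoopA_map (l : List Int) : ∀ (c t : Int), 0 ≤ t →
    countActiveLoopA c (l.map (fun y => max 0 (y - t)))
      = c + l.foldl (fun count x => if x > count then count + 1 else count) t - t := by
  induction l with
  | nil => intro c t _; simp [countActiveLoopA]
  | cons x rest ih =>
    intro c t ht
    simp only [List.map_cons, countActiveLoopA, List.foldl_cons]
    by_cases hx : x > t
    · have h1 : max 0 (x - t) > 0 := by omega
      rw [if_pos h1, if_pos hx]
      have hcomp : (rest.map (fun y => max 0 (y - t))).map (fun y => max 0 (y - 1))
          = rest.map (fun y => max 0 (y - (t + 1))) := by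
        rw [List.map_map]; apply List.map_congr_left; intro y _; simp; omega
      rw [hcomp, ih (c + 1) (t + 1) (by omega)]
      omega
    · have h1 : ¬ max 0 (x - t) > 0 := by omega
      rw [if_neg h1, if_neg hx]
      exact ih c t ht

theorem countActiveLoopA_eq (l : List Int) : ∀ (c : Int),
    countActiveLoopA c l
      = c + l.foldl (fun count x => if x > count then count + 1 else count) 0 := by
  induction l with
  | nil => intro c; simp [countActiveLoopA]
  | cons x rest ih =>
    intro c
    simp only [countActiveLoopA, List.foldl_cons]
    by_cases hx : x > 0
    · rw [if_pos hx, if_pos hx, countActiveLoopA_map rest (c + 1) 1 (by omega)]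
      simp only [zero_add]; omega
    · rw [if_neg hx, if_neg hx]
      exact ih c

-- ===== VERDICT (by name: the statement is the Claim_ definition above) =====
theorem count_active_devices_spec : Claim_equal_count_active_devices := by
  intro l _
  unfold Spec_count_active_devices count_active_devices count_active_devices_alt
  rw [countActiveLoopA_eq l 0]
  omega
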